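-- pv_equiv track=rewrite | github.com/ABnumbuf/EdMod_Teacher | My_Knapsack.py | knapSack_loop_out
-- ===== SOURCE A (Python) =====
-- def knapSack_loop_out(W, S, result, text):
--     n = len(W)
--     if n == 0:
--         text.append(f'Решение: {result}\n')
--         res = "".join(text)
--         return res
--     if (W[n-1] <= S):
--         result[n-1] = 1
--         S = S - W[n-1]
--         text.append(f'w_{n-1} = {W[n-1]} <= S = {S}\n')
--     else:
--         result[n-1] = 0
--         text.append(f'w_{n-1} = {W[n-1]} > S = {S}\n')
--     text.append(f'x_{n-1} = {result[n-1]}\n')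
--     w = []
--     for i in range(n-1): w.append(W[i])
--     return knapSack_loop_out(w, S, result, text)
-- ===== SOURCE B (Python) =====
-- def knapSack_loop_out(W, S, result, text):
--     for i in range(len(W) - 1, -1, -1):
--         w = W[i]
--         if w <= S:
--             result[i] = 1
--             S = S - w
--             text.append(f'w_{i} = {w} <= S = {S}\n')
--         else:
--             result[i] = 0
--             text.append(f'w_{i} = {w} > S = {S}\n')
--         text.append(f'x_{i} = {result[i]}\n')
--     text.append(f'Решение: {result}\n')
--     return "".join(text)
-- ===== Notes on version B (the rewrite author's own statement) =====
-- stated objective: faster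
-- what changed: Replaced A's tail recursion that rebuilds a copy of the weight-list prefix at every level with a single iterative for-loop over indices n-1 down to 0, mutating S/result/text in place; no list copying, no recursion.
import Mathlib
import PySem

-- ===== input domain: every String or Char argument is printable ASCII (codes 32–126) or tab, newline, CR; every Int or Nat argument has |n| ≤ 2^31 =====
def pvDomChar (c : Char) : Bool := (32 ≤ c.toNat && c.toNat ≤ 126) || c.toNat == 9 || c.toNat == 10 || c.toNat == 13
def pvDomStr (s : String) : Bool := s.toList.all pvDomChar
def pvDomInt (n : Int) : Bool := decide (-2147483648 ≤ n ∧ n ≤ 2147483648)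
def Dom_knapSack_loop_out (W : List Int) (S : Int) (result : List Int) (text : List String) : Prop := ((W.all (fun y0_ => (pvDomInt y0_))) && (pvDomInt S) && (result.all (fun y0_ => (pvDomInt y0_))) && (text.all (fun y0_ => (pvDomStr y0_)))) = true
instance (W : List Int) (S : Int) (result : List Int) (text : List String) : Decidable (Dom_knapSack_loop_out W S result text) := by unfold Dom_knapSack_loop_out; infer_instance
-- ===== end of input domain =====

-- B replaces A's tail recursion (which copies the weight-list prefix at every level) by one
-- iterative countdown loop over the indices; simpler, no list copying. Return-value equivalence only:
-- both Pythons mutate result/text in place the same way.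

-- f'{result}' — Python's repr of a list of ints (shared formatting helper of both ports)
def pyReprIntList (xs : List Int) : String :=
  "[" ++ PySem.Str.join ", " (xs.map PySem.Int.toStr) ++ "]"

-- ===== PORT A =====
def knapSack_loop_out (W : List Int) (S : Int) (result : List Int) (text : List String) : String :=
  let n := W.length
  if _h : n = 0 then
    PySem.Str.join "" (text ++ ["Решение: " ++ pyReprIntList result ++ "\n"])
  else
    let j : Int := (n : Int) - 1
    let wl := PySem.List.pyGetD W j 0
    if wl ≤ S then
      let result' := PySem.List.pySetD result j 1
      let S' := S - wl
      let text' := text ++ ["w_" ++ PySem.Int.toStr j ++ " = " ++ PySem.Int.toStr wl ++ " <= S = " ++ PySem.Int.toStr S' ++ "\n"]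
      let text'' := text' ++ ["x_" ++ PySem.Int.toStr j ++ " = " ++ PySem.Int.toStr (PySem.List.pyGetD result' j 0) ++ "\n"]
      let w := (PySem.List.pyRange 0 ((n : Int) - 1) 1).foldl (fun acc i => acc ++ [PySem.List.pyGetD W i 0]) []
      knapSack_loop_out w S' result' text''
    else
      let result' := PySem.List.pySetD result j 0
      let text' := text ++ ["w_" ++ PySem.Int.toStr j ++ " = " ++ PySem.Int.toStr wl ++ " > S = " ++ PySem.Int.toStr S ++ "\n"]
      let text'' := text' ++ ["x_" ++ PySem.Int.toStr j ++ " = " ++ PySem.Int.toStr (PySem.List.pyGetD result' j 0) ++ "\n"]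
      let w := (PySem.List.pyRange 0 ((n : Int) - 1) 1).foldl (fun acc i => acc ++ [PySem.List.pyGetD W i 0]) []
      knapSack_loop_out w S result' text''
termination_by W.length
decreasing_by
  all_goals
    simp only [PySem.List.foldl_append_eq_flatMap, List.nil_append]
    simp [PySem.List.length_pyRange_one]
    omega

-- ===== PORT B =====
-- one loop body step: 'for i in range(len(W)-1, -1, -1): …' acting on the state (S, result, text)
def knapAltStep (W : List Int) (st : Int × List Int × List String) (i : Int) : Int × List Int × List String :=
  let w := PySem.List.pyGetD W i 0
  if w ≤ st.1 then
    let result := PySem.List.pySetD st.2.1 i 1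
    let S := st.1 - w
    let text := st.2.2 ++ ["w_" ++ PySem.Int.toStr i ++ " = " ++ PySem.Int.toStr w ++ " <= S = " ++ PySem.Int.toStr S ++ "\n"]
    (S, result, text ++ ["x_" ++ PySem.Int.toStr i ++ " = " ++ PySem.Int.toStr (PySem.List.pyGetD result i 0) ++ "\n"])
  else
    let result := PySem.List.pySetD st.2.1 i 0
    let text := st.2.2 ++ ["w_" ++ PySem.Int.toStr i ++ " = " ++ PySem.Int.toStr w ++ " > S = " ++ PySem.Int.toStr st.1 ++ "\n"]
    (st.1, result, text ++ ["x_" ++ PySem.Int.toStr i ++ " = " ++ PySem.Int.toStr (PySem.List.pyGetD result i 0) ++ "\n"])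

def knapSack_loop_out_alt (W : List Int) (S : Int) (result : List Int) (text : List String) : String :=
  let st := (PySem.List.pyRange ((W.length : Int) - 1) (-1) (-1)).foldl (knapAltStep W) (S, result, text)
  PySem.Str.join "" (st.2.2 ++ ["Решение: " ++ pyReprIntList st.2.1 ++ "\n"])

-- ===== PRECONDITION & SPEC =====
-- Pre_ excludes result shorter than W: there Python A raises IndexError at 'result[n-1] = …' (B likewise).
def Pre_knapSack_loop_out (W : List Int) (S : Int) (result : List Int) (text : List String) : Prop :=
  W.length ≤ result.length
instance (W : List Int) (S : Int) (result : List Int) (text : List String) : Decidable (Pre_knapSack_loop_out W S result text) := by unfold Pre_knapSack_loop_out; infer_instance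

def pvWitness_knapSack_loop_out : List Int × Int × List Int × List String := ([3, 1], 4, [0, 0], [])

def Spec_knapSack_loop_out (W : List Int) (S : Int) (result : List Int) (text : List String) (out : String) : Prop := out = knapSack_loop_out_alt W S result text
instance (W : List Int) (S : Int) (result : List Int) (text : List String) (out : String) : Decidable (Spec_knapSack_loop_out W S result text out) := by unfold Spec_knapSack_loop_out; infer_instance

-- ===== CLAIM (what is proved, stated in full; the proofs are below) =====
def Claim_equal_knapSack_loop_out : Prop := ∀ (W : List Int) (S : Int) (result : List Int) (text : List String), Dom_knapSack_loop_out W S result text → Pre_knapSack_loop_out W S result text → Spec_knapSack_loop_out W S result text (knapSack_loop_out W S result text)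

-- ===== LEMMAS AND PROOFS =====

-- A's prefix-copy loop builds exactly W.dropLast
lemma knap_prefix_eq_dropLast (W : List Int) :
    (PySem.List.pyRange 0 ((W.length : Int) - 1) 1).foldl (fun acc i => acc ++ [PySem.List.pyGetD W i 0]) [] = W.dropLast := by
  rw [PySem.List.foldl_append_eq_flatMap, ← List.map_eq_flatMap]
  simp only [List.nil_append]
  rcases W.eq_nil_or_concat with h | ⟨ys, y, h⟩
  · subst h
    rfl
  · subst h
    apply List.ext_getElem
    · simp [PySem.List.length_pyRange_one]
    · intro k h1 h2
      simp only [List.getElem_map, PySem.List.getElem_pyRange_one]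
      have hk : k < ys.length := by
        simpa [PySem.List.length_pyRange_one, List.length_concat] using h1
      rw [PySem.List.pyGetD_eq_getElem (ys.concat y) 0 (by omega) (by push_cast [List.length_concat]; omega)]
      simp [List.concat_eq_append, hk]

lemma knapAlt_body_congr (W : List Int) (hW : W ≠ []) (st : Int × List Int × List String) :
    (PySem.List.pyRange ((W.length : Int) - 1 - 1) (-1) (-1)).foldl (knapAltStep W) st
      = (PySem.List.pyRange ((W.dropLast.length : Int) - 1) (-1) (-1)).foldl (knapAltStep W.dropLast) st := by
  have hlen : (W.dropLast.length : Int) = (W.length : Int) - 1 := by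
    have := List.length_pos_of_ne_nil hW
    simp [List.length_dropLast]; omega
  rw [hlen]
  apply PySem.List.foldl_congr_mem
  intro a i hi
  have hmem := (PySem.List.mem_pyRange_neg_one).1 hi
  have h0 : 0 ≤ i := by omega
  have hilt : i < (W.dropLast.length : Int) := by omega
  have hgd : PySem.List.pyGetD W i 0 = PySem.List.pyGetD W.dropLast i 0 := by
    rw [PySem.List.pyGetD_eq_getElem W 0 h0 (by omega),
        PySem.List.pyGetD_eq_getElem W.dropLast 0 h0 hilt]
    rw [List.getElem_dropLast]
  simp only [knapAltStep, hgd]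

lemma knap_eq_alt : ∀ (n : Nat) (W : List Int), W.length = n →
    ∀ (S : Int) (result : List Int) (text : List String),
    knapSack_loop_out W S result text = knapSack_loop_out_alt W S result text := by
  intro n
  induction n with
  | zero =>
    intro W hW S result text
    have : W = [] := List.length_eq_zero_iff.mp hW
    subst this
    simp [knapSack_loop_out, knapSack_loop_out_alt, PySem.List.pyRange_neg_one_eq_nil (by norm_num : (-1 : Int) ≤ -1)]
  | succ m ih =>
    intro W hW S result text
    have hne : W ≠ [] := by intro h; subst h; simp at hW
    have hn0 : ¬ (W.length = 0) := by omega
    rw [knapSack_loop_out]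
    simp only [dif_neg hn0]
    rw [knap_prefix_eq_dropLast]
    have hdl : W.dropLast.length = m := by simp [List.length_dropLast, hW]
    have hcons : PySem.List.pyRange ((W.length : Int) - 1) (-1) (-1)
        = ((W.length : Int) - 1) :: PySem.List.pyRange ((W.length : Int) - 1 - 1) (-1) (-1) := by
      apply PySem.List.pyRange_neg_one_cons
      rw [hW]; push_cast; omega
    by_cases hb : PySem.List.pyGetD W ((W.length : Int) - 1) 0 ≤ S
    · rw [if_pos hb, ih _ hdl]
      unfold knapSack_loop_out_alt
      rw [hcons]
      simp only [List.foldl_cons]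
      rw [show knapAltStep W (S, result, text) ((W.length : Int) - 1)
            = (S - PySem.List.pyGetD W ((W.length : Int) - 1) 0,
               PySem.List.pySetD result ((W.length : Int) - 1) 1,
               (text ++ ["w_" ++ PySem.Int.toStr ((W.length : Int) - 1) ++ " = " ++ PySem.Int.toStr (PySem.List.pyGetD W ((W.length : Int) - 1) 0) ++ " <= S = " ++ PySem.Int.toStr (S - PySem.List.pyGetD W ((W.length : Int) - 1) 0) ++ "\n"]) ++ ["x_" ++ PySem.Int.toStr ((W.length : Int) - 1) ++ " = " ++ PySem.Int.toStr (PySem.List.pyGetD (PySem.List.pySetD result ((W.length : Int) - 1) 1) ((W.length : Int) - 1) 0) ++ "\n"]) from by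
        simp [knapAltStep, hb]]
      rw [knapAlt_body_congr W hne]
    · rw [if_neg hb, ih _ hdl]
      unfold knapSack_loop_out_alt
      rw [hcons]
      simp only [List.foldl_cons]
      rw [show knapAltStep W (S, result, text) ((W.length : Int) - 1)
            = (S,
               PySem.List.pySetD result ((W.length : Int) - 1) 0,
               (text ++ ["w_" ++ PySem.Int.toStr ((W.length : Int) - 1) ++ " = " ++ PySem.Int.toStr (PySem.List.pyGetD W ((W.length : Int) - 1) 0) ++ " > S = " ++ PySem.Int.toStr S ++ "\n"]) ++ ["x_" ++ PySem.Int.toStr ((W.length : Int) - 1) ++ " = " ++ PySem.Int.toStr (PySem.List.pyGetD (PySem.List.pySetD result ((W.length : Int) - 1) 0) ((W.length : Int) - 1) 0) ++ "\n"]) from by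
        simp [knapAltStep, hb]]
      rw [knapAlt_body_congr W hne]

-- ===== VERDICT (by name: the statement is the Claim_ definition above) =====
theorem knapSack_loop_out_spec : Claim_equal_knapSack_loop_out := by
  intro W S result text _hDom _hPre
  unfold Spec_knapSack_loop_out
  exact knap_eq_alt W.length W rfl S result text
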